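-- pv_equiv track=rewrite | github.com/RST-Bruit-Cerema/Mizogeo | verificationDonnees.py | VerificationDepartementPpbe
-- ===== SOURCE A (Python) =====
-- def VerificationDepartementPpbe(listeDepartement):
--     """
--     en entree
--         listeDepartement ----> tye list de string
--     en sortie
--         1 ou 0 ---> type int
--     """
--     nbCaracteresNonToleres=len(listeDepartement)-sum(c.isdigit() for c in listeDepartement)-listeDepartement.count(',')#deduction d'apres le calcul du nombre de chiffre et de , dans le texte
--
--     departementATraiter=listeDepartement.split(',')#verification que chaque departement est bien ecrit sur 3 chiffres
--     nbErreurlongueur=0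
--     for dept in departementATraiter :
--         if len(dept) !=3 :
--             nbErreurlongueur+=1
--
--     if nbCaracteresNonToleres !=0 or nbErreurlongueur!=0 :
--         return 1
--     else :
--         return 0
-- ===== SOURCE B (Python) =====
-- def VerificationDepartementPpbe(listeDepartement):
--     # simpler: one pass over the comma-separated parts, validating each part
--     # (exactly 3 characters, all digits) with an early return.
--     for dept in listeDepartement.split(','):
--         if len(dept) != 3 or not dept.isdigit():
--             return 1
--     return 0
-- ===== Notes on version B (the rewrite author's own statement) =====
-- stated objective: simpler
-- what changed: Replaces the global len-minus-digits-minus-commas counting pass plus a separate length-error counter with a single loop over the split parts that validates each part (length 3 and all digits) and returns 1 at the first bad part.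
import Mathlib
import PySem

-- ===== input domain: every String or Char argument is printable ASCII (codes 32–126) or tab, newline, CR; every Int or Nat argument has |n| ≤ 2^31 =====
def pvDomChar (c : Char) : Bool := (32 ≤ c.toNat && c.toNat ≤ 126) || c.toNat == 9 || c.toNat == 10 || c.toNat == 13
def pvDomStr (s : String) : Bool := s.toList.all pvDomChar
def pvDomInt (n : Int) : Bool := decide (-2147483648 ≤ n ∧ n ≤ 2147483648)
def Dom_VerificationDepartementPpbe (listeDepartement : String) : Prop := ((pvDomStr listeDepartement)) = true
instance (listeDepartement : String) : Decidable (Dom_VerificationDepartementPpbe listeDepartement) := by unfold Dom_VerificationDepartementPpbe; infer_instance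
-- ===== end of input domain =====

-- B replaces A's global character-counting pass plus separate length-error counter by one
-- early-return loop over the split parts (objective: simpler).

-- ===== PORT A =====
def VerificationDepartementPpbe (listeDepartement : String) : Int :=
  let nbCaracteresNonToleres : Int :=
    PySem.Str.len listeDepartement
      - (listeDepartement.toList.map (fun c => if PySem.Chars.isdigit c then (1 : Int) else 0)).sum
      - (PySem.Str.count listeDepartement "," : Int)
  let departementATraiter := PySem.Chars.splitOn listeDepartement.toList [',']
  let nbErreurlongueur : Int :=
    departementATraiter.foldl (fun acc dept => if PySem.Chars.len dept ≠ 3 then acc + 1 else acc) 0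
  if nbCaracteresNonToleres ≠ 0 ∨ nbErreurlongueur ≠ 0 then 1 else 0

-- ===== PORT B =====
def pvAltLoop : List (List Char) → Int
  | [] => 0
  | dept :: rest =>
      if PySem.Chars.len dept ≠ 3 ∨ PySem.Chars.strIsdigit dept = false then 1 else pvAltLoop rest

def VerificationDepartementPpbe_alt (listeDepartement : String) : Int :=
  pvAltLoop (PySem.Chars.splitOn listeDepartement.toList [','])

-- ===== PRECONDITION & SPEC =====
def Spec_VerificationDepartementPpbe (listeDepartement : String) (out : Int) : Prop := out = VerificationDepartementPpbe_alt listeDepartement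
instance (listeDepartement : String) (out : Int) : Decidable (Spec_VerificationDepartementPpbe listeDepartement out) := by unfold Spec_VerificationDepartementPpbe; infer_instance

-- ===== CLAIM (what is proved, stated in full; the proofs are below) =====
def Claim_equal_VerificationDepartementPpbe : Prop := ∀ (listeDepartement : String), Dom_VerificationDepartementPpbe listeDepartement → Spec_VerificationDepartementPpbe listeDepartement (VerificationDepartementPpbe listeDepartement)

-- ===== LEMMAS AND PROOFS =====

-- reference splitter: split a char list on ','
def pvSplitComma : List Char → List (List Char)
  | [] => [[]]
  | c :: rest =>
      if c = ',' then [] :: pvSplitComma rest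
      else
        match pvSplitComma rest with
        | [] => [[c]]
        | p :: ps => (c :: p) :: ps

lemma pvSplitComma_ne_nil (l : List Char) : pvSplitComma l ≠ [] := by
  cases l with
  | nil => simp [pvSplitComma]
  | cons c rest =>
    simp only [pvSplitComma]
    split_ifs
    · simp
    · cases h : pvSplitComma rest <;> simp

lemma pvSplitComma_cons (l : List Char) : ∃ p ps, pvSplitComma l = p :: ps := by
  cases hsp : pvSplitComma l with
  | nil => exact absurd hsp (pvSplitComma_ne_nil l)
  | cons p ps => exact ⟨p, ps, rfl⟩

lemma splitOn_go_eq (fuel : Nat) (l cur : List Char) (accs : List (List Char))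
    (h : l.length ≤ fuel) :
    PySem.Chars.splitOn.go [','] fuel l cur accs =
      accs.reverse ++ (pvSplitComma l).modifyHead (cur.reverse ++ ·) := by
  induction fuel generalizing l cur accs with
  | zero =>
    have hl : l = [] := by cases l <;> simp_all
    subst hl
    simp [PySem.Chars.splitOn.go, pvSplitComma]
  | succ n ih =>
    cases l with
    | nil => simp [PySem.Chars.splitOn.go, pvSplitComma]
    | cons c rest =>
      rw [PySem.Chars.splitOn.go]
      by_cases hc : c = ','
      · subst hc
        rw [if_pos (by simp [List.isPrefixOf])]
        simp only [List.length_cons] at h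
        rw [show List.drop [','].length (',' :: rest) = rest from rfl,
            ih rest [] (cur.reverse :: accs) (by omega)]
        obtain ⟨p, ps, hps⟩ := pvSplitComma_cons rest
        simp [pvSplitComma, hps, List.modifyHead]
      · rw [if_neg (by simp [List.isPrefixOf]; exact fun h' => (hc h'.symm).elim)]
        simp only [List.length_cons] at h
        rw [ih rest (c :: cur) accs (by omega)]
        obtain ⟨p, ps, hps⟩ := pvSplitComma_cons rest
        simp [pvSplitComma, hc, hps, List.modifyHead]

lemma splitOn_eq (l : List Char) :
    PySem.Chars.splitOn l [','] = pvSplitComma l := by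
  rw [PySem.Chars.splitOn, splitOn_go_eq (l.length + 1) l [] [] (by omega)]
  obtain ⟨p, ps, hps⟩ := pvSplitComma_cons l
  simp [hps, List.modifyHead]

lemma count_go_eq (fuel : Nat) (l : List Char) (acc : Nat) (h : l.length ≤ fuel) :
    PySem.Chars.count.go [','] fuel l acc = acc + l.count ',' := by
  induction fuel generalizing l acc with
  | zero =>
    have hl : l = [] := by cases l <;> simp_all
    subst hl; simp [PySem.Chars.count.go]
  | succ n ih =>
    cases l with
    | nil => simp [PySem.Chars.count.go]
    | cons c rest =>
      rw [PySem.Chars.count.go]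
      simp only [List.length_cons] at h
      by_cases hc : c = ','
      · subst hc
        rw [if_pos (by simp [List.isPrefixOf])]
        rw [show List.drop [','].length (',' :: rest) = rest from rfl,
            ih rest (acc + 1) (by omega)]
        simp [List.count_cons]
        omega
      · rw [if_neg (by simp [List.isPrefixOf]; exact fun h' => (hc h'.symm).elim)]
        rw [ih rest acc (by omega)]
        simp [hc]

lemma count_comma_eq (l : List Char) : PySem.Chars.count l [','] = l.count ',' := by
  rw [PySem.Chars.count]
  simp only [List.isEmpty_cons, if_false, Bool.false_eq_true]
  simpa using count_go_eq l.length l 0 (le_refl _)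

-- length = digits + commas + everything else
lemma length_split (l : List Char) :
    l.length = l.countP PySem.Chars.isdigit + l.count ','
      + l.countP (fun c => !PySem.Chars.isdigit c && !(c == ',')) := by
  induction l with
  | nil => simp
  | cons c rest ih =>
    have hd : PySem.Chars.isdigit ',' = false := by decide
    simp only [List.length_cons, List.countP_cons, List.count_cons, ih]
    by_cases hc : c = ',' <;> by_cases hdc : PySem.Chars.isdigit c <;>
      simp_all <;> omega

lemma sum_isdigit (l : List Char) :
    (l.map (fun c => if PySem.Chars.isdigit c then (1 : Int) else 0)).sum
      = (l.countP PySem.Chars.isdigit : Int) := by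
  induction l with
  | nil => simp
  | cons c rest ih =>
    simp only [List.map_cons, List.sum_cons, List.countP_cons, ih]
    by_cases hdc : PySem.Chars.isdigit c = true <;> simp [hdc] <;> push_cast <;> ring

-- membership transfer between l and its comma-split parts
lemma mem_splitComma_of_mem (l : List Char) (c : Char) (hc : c ∈ l) (hne : c ≠ ',') :
    ∃ p ∈ pvSplitComma l, c ∈ p := by
  induction l with
  | nil => simp at hc
  | cons d rest ih =>
    simp only [pvSplitComma]
    by_cases hd : d = ','
    · subst hd
      rcases List.mem_cons.mp hc with h | h
      · exact absurd h hne
      · obtain ⟨p, hp, hcp⟩ := ih h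
        exact ⟨p, by simp [hp], hcp⟩
    · obtain ⟨p, ps, hps⟩ := pvSplitComma_cons rest
      rw [if_neg hd, hps]
      rcases List.mem_cons.mp hc with h | h
      · exact ⟨d :: p, by simp, by simp [h]⟩
      · obtain ⟨q, hq, hcq⟩ := ih h
        rw [hps] at hq
        rcases List.mem_cons.mp hq with h' | h'
        · exact ⟨d :: p, by simp, by simp [h' ▸ hcq]⟩
        · exact ⟨q, by simp [h'], hcq⟩

lemma mem_of_mem_splitComma (l : List Char) (p : List Char) (c : Char)
    (hp : p ∈ pvSplitComma l) (hcp : c ∈ p) : c ∈ l := by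
  induction l generalizing p with
  | nil =>
    simp [pvSplitComma] at hp; subst hp; simp at hcp
  | cons d rest ih =>
    simp only [pvSplitComma] at hp
    by_cases hd : d = ','
    · rw [if_pos hd] at hp
      rcases List.mem_cons.mp hp with h | h
      · subst h; simp at hcp
      · exact List.mem_cons_of_mem _ (ih p h hcp)
    · obtain ⟨q, qs, hqs⟩ := pvSplitComma_cons rest
      rw [if_neg hd, hqs] at hp
      rcases List.mem_cons.mp hp with h | h
      · subst h
        rcases List.mem_cons.mp hcp with h' | h'
        · simp [h']
        · exact List.mem_cons_of_mem _ (ih q (by simp [hqs]) h')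
      · exact List.mem_cons_of_mem _ (ih p (by simp [hqs, h]) hcp)

lemma comma_not_mem_splitComma (l : List Char) (p : List Char)
    (hp : p ∈ pvSplitComma l) : ',' ∉ p := by
  induction l generalizing p with
  | nil => simp [pvSplitComma] at hp; subst hp; simp
  | cons d rest ih =>
    simp only [pvSplitComma] at hp
    by_cases hd : d = ','
    · rw [if_pos hd] at hp
      rcases List.mem_cons.mp hp with h | h
      · subst h; simp
      · exact ih p h
    · obtain ⟨q, qs, hqs⟩ := pvSplitComma_cons rest
      rw [if_neg hd, hqs] at hp
      rcases List.mem_cons.mp hp with h | h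
      · subst h
        intro hmem
        rcases List.mem_cons.mp hmem with h' | h'
        · exact hd h'.symm
        · exact ih q (by simp [hqs]) h'
      · exact ih p (by simp [hqs, h])

-- B's loop returns 0 iff every part is a 3-char all-digit string
lemma pvAltLoop_eq_zero_iff (parts : List (List Char)) :
    pvAltLoop parts = 0 ↔
      ∀ p ∈ parts, p.length = 3 ∧ p.all PySem.Chars.isdigit = true := by
  induction parts with
  | nil => simp [pvAltLoop]
  | cons p ps ih =>
    simp only [pvAltLoop]
    by_cases h : PySem.Chars.len p ≠ 3 ∨ PySem.Chars.strIsdigit p = false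
    · rw [if_pos h]
      constructor
      · intro h0; exact absurd h0 (by norm_num)
      · intro hall
        obtain ⟨h3, hd⟩ := hall p (by simp)
        rcases h with h | h
        · exact absurd (by simp [PySem.Chars.len, h3]) h
        · rw [PySem.Chars.strIsdigit] at h
          have hne : p ≠ [] := by intro hnil; subst hnil; simp at h3
          simp [hne] at h
          exact absurd hd (by simp [h])
    · rw [if_neg h]
      push_neg at h
      obtain ⟨h3, hd⟩ := h
      rw [PySem.Chars.len] at h3
      have hplen : p.length = 3 := by exact_mod_cast h3
      rw [PySem.Chars.strIsdigit] at hd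
      have hpd : p.all PySem.Chars.isdigit = true := by
        have hne : p ≠ [] := by intro hnil; subst hnil; simp at hplen
        simp [hne] at hd
        exact List.all_eq_true.mpr hd
      rw [ih]
      constructor
      · intro hall q hq
        rcases List.mem_cons.mp hq with h' | h'
        · exact h' ▸ ⟨hplen, hpd⟩
        · exact hall q h'
      · intro hall q hq; exact hall q (List.mem_cons_of_mem _ hq)

lemma pvAltLoop_zero_or_one (parts : List (List Char)) :
    pvAltLoop parts = 0 ∨ pvAltLoop parts = 1 := by
  induction parts with
  | nil => simp [pvAltLoop]
  | cons p ps ih => simp only [pvAltLoop]; split_ifs <;> simp [ih]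

-- the main equivalence
lemma main_eq (s : String) :
    VerificationDepartementPpbe s = VerificationDepartementPpbe_alt s := by
  unfold VerificationDepartementPpbe VerificationDepartementPpbe_alt
  simp only [splitOn_eq]
  set l := s.toList with hl
  have hcount : PySem.Str.count s "," = l.count ',' := by
    rw [PySem.Str.count]
    exact count_comma_eq l
  have hlen : PySem.Str.len s = (l.length : Int) := rfl
  rw [hcount, hlen, sum_isdigit]
  have hfold : ∀ (ps : List (List Char)) (a : Int),
      ps.foldl (fun acc dept => if PySem.Chars.len dept ≠ 3 then acc + 1 else acc) a
        = a + (ps.countP (fun dept => dept.length ≠ 3) : Int) := by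
    intro ps
    induction ps with
    | nil => simp
    | cons p qs ih =>
      intro a
      simp only [List.foldl_cons, List.countP_cons, ih]
      by_cases hp : p.length = 3
      · rw [if_neg (by simp [PySem.Chars.len]; exact_mod_cast hp)]
        simp [hp]
      · rw [if_pos (by simp [PySem.Chars.len]; exact_mod_cast hp)]
        simp [hp]
        push_cast
        ring
  rw [hfold]
  have hsplitNat := length_split l
  set bad := l.countP (fun c => !PySem.Chars.isdigit c && !(c == ',')) with hbad
  have hnb : (l.length : Int) - (l.countP PySem.Chars.isdigit : Int) - (l.count ',' : Int)
      = (bad : Int) := by omega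
  rw [hnb]
  by_cases hz : pvAltLoop (pvSplitComma l) = 0
  · rw [hz]
    rw [pvAltLoop_eq_zero_iff] at hz
    have hbad0 : bad = 0 := by
      rw [hbad, List.countP_eq_zero]
      intro c hc
      by_cases hcc : c = ','
      · simp [hcc]
      · obtain ⟨p, hp, hcp⟩ := mem_splitComma_of_mem l c hc hcc
        have := (hz p hp).2
        rw [List.all_eq_true] at this
        simp [this c hcp]
    rw [if_neg (by simp [hbad0]; intro a ha; exact (hz a ha).1)]
  · rcases pvAltLoop_zero_or_one (pvSplitComma l) with h0 | h1
    · exact absurd h0 hz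
    · rw [h1]
      rw [pvAltLoop_eq_zero_iff] at hz
      push_neg at hz
      obtain ⟨p, hp, hbadp⟩ := hz
      rw [if_pos ?_]
      by_cases hp3 : p.length = 3
      · -- some part has a non-digit character: bad > 0
        obtain ⟨c, hcp, hcd⟩ : ∃ c ∈ p, ¬ PySem.Chars.isdigit c := by
          by_contra hall
          push_neg at hall
          exact (hbadp hp3) (List.all_eq_true.mpr (fun c hc => by
            simpa using hall c hc))
        left
        have hcl : c ∈ l := mem_of_mem_splitComma l p c hp hcp
        have hcc : c ≠ ',' := by
          intro hcc; subst hcc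
          exact comma_not_mem_splitComma l p hp hcp
        have hpos : 0 < bad := by
          rw [hbad, List.countP_pos_iff]
          exact ⟨c, hcl, by simp [hcc]; simpa using hcd⟩
        omega
      · right
        have hpos : 0 < (pvSplitComma l).countP (fun dept => dept.length ≠ 3) := by
          rw [List.countP_pos_iff]
          exact ⟨p, hp, by simp [hp3]⟩
        omega

-- ===== VERDICT (by name: the statement is the Claim_ definition above) =====
theorem VerificationDepartementPpbe_spec : Claim_equal_VerificationDepartementPpbe := by
  intro s _
  unfold Spec_VerificationDepartementPpbe
  exact main_eq s
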